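-- pv_equiv track=rewrite | github.com/Vikvas6/GeekBrainsHomeWork | hw03_hard.py | uprostit
-- ===== SOURCE A (Python) =====
-- def uprostit(oper1):
--     s = abs(oper1[1] // 2)
--     while s > 1:
--         if oper1[0] % s == 0 and oper1[1] % s == 0:
--             return uprostit((int(oper1[0]/s), int(oper1[1]/s)))
--         else:
--             s -= 1
--     return oper1
-- ===== SOURCE B (Python) =====
-- def _gcd(x, y):
--     while y:
--         x, y = y, x % y
--     return x
--
--
-- def _minfac(g):
--     # smallest divisor >= 2 of g (g itself if g is prime), O(sqrt g)
--     i = 2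
--     while i * i <= g:
--         if g % i == 0:
--             return i
--         i += 1
--     return g
--
--
-- def uprostit(oper1):
--     # Closed form: the largest common divisor s <= |b|//2 is g = gcd(a, b)
--     # itself when |b| >= 2g (then one division fully reduces the pair), and
--     # otherwise (|b| = g) it is g's largest proper divisor g // _minfac(g);
--     # after dividing by it the pair's gcd is prime and exceeds the new bound,
--     # so no further step applies.  O(sqrt g) instead of A's O(|b|) scan.
--     a = oper1[0]
--     b = oper1[1]
--     g = _gcd(abs(a), abs(b))
--     bound = abs(b) // 2
--     if 2 <= g <= bound:
--         return (a // g, b // g)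
--     if g >= 2:
--         d = g // _minfac(g)
--         if 2 <= d <= bound:
--             return (a // d, b // d)
--     return oper1
-- ===== Notes on version B (the rewrite author's own statement) =====
-- stated objective: faster
-- what changed: A scans s downward from |b|//2 in O(|b|) steps per recursion to find the largest common divisor; B computes gcd(a,b) by Euclid and derives the answer in closed form (the step divisor is the gcd itself when |b| >= 2*gcd, else the gcd's largest proper divisor found by O(sqrt g) trial division), with no scan and no recursion.
-- outside the precondition, e.g. on uprostit(()): A raises IndexError, B raises IndexError; on uprostit((5,)): A raises IndexError, B raises IndexError
import Mathlib
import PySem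

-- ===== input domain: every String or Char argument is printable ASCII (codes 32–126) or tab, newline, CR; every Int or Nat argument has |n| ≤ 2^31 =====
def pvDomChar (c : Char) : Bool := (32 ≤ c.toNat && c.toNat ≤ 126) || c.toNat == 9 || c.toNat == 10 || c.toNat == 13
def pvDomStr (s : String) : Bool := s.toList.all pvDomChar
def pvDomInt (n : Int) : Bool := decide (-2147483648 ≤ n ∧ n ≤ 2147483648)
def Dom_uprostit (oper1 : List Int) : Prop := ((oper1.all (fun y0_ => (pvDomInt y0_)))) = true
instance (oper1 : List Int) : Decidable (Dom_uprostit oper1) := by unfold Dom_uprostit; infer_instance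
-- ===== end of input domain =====

-- B replaces A's O(|b|) countdown scan for the largest common divisor ≤ |b|//2 by a derived
-- closed form (Euclid gcd + smallest-factor trial division; at most two division steps).

-- ===== PORT A =====
-- A's while loop: scan s downward, first s ≥ 2 with a % s == 0 and b % s == 0
def findS (a b : Int) : Nat → Option Nat
  | 0 => none
  | 1 => none
  | s+2 =>
    if PySem.Int.mod a ((s:Int)+2) = 0 ∧ PySem.Int.mod b ((s:Int)+2) = 0
    then some (s+2) else findS a b (s+1)

-- termination helper for uprostit (cited by its decreasing_by)
theorem findS_some_facts {a b : Int} {n s : Nat} (h : findS a b n = some s) :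
    2 ≤ s ∧ s ≤ n ∧ ((s:Int) ∣ a) ∧ ((s:Int) ∣ b) := by
  induction n with
  | zero => simp [findS] at h
  | succ m ih =>
    cases m with
    | zero => simp [findS] at h
    | succ k =>
      rw [findS] at h
      split at h
      · rename_i hc
        obtain ⟨h1, h2⟩ := hc
        rw [PySem.Int.mod_eq_zero_iff_dvd] at h1 h2
        cases h
        refine ⟨by omega, le_refl _, ?_, ?_⟩
        · exact_mod_cast h1
        · exact_mod_cast h2
      · obtain ⟨hs2, hsn, hda, hdb⟩ := ih h
        exact ⟨hs2, by omega, hda, hdb⟩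

theorem natAbs_tdiv_lt {b : Int} {s : Nat} (h2 : 2 ≤ s) (hd : (s:Int) ∣ b)
    (hb : b ≠ 0) : (b.tdiv (s:Int)).natAbs < b.natAbs := by
  obtain ⟨k, rfl⟩ := hd
  rw [Int.mul_tdiv_cancel_left _ (by exact_mod_cast (by omega : s ≠ 0))]
  have hk : k ≠ 0 := by rintro rfl; simp at hb
  have hlt : 1 * k.natAbs < s * k.natAbs :=
    (Nat.mul_lt_mul_right (Nat.pos_of_ne_zero (Int.natAbs_ne_zero.mpr hk))).mpr (by omega)
  calc k.natAbs = 1 * k.natAbs := (Nat.one_mul _).symm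
    _ < s * k.natAbs := hlt
    _ = ((s:Int) * k).natAbs := by rw [Int.natAbs_mul, Int.natAbs_natCast]

def uprostit (oper1 : List Int) : List Int :=
  match _h0 : PySem.List.pyGet? oper1 0, h1 : PySem.List.pyGet? oper1 1 with
  | some a, some b =>
    -- s = abs(oper1[1] // 2); while s > 1: …; s -= 1
    match hs : findS a b (PySem.Int.floordiv b 2).natAbs with
    -- int(oper1[i]/s): the branch guarantees s ∣ a and s ∣ b, so the float quotient is the
    -- exact integer and int() truncation is Int.tdiv (exact on the |n| ≤ 2^31 domain)
    | some s => uprostit [Int.tdiv a (s:Int), Int.tdiv b (s:Int)]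
    | none => oper1
  | _, _ => oper1
termination_by ((PySem.List.pyGet? oper1 1).getD 0).natAbs
decreasing_by
  obtain ⟨hs2, hsn, hda, hdb⟩ := findS_some_facts hs
  have hb0 : b ≠ 0 := by
    rintro rfl
    simp [PySem.Int.floordiv] at hsn
    omega
  simp only [h1, Option.getD_some]
  have h2 : PySem.List.pyGet? [Int.tdiv a (s:Int), Int.tdiv b (s:Int)] 1 =
      some (Int.tdiv b (s:Int)) := by
    simp [PySem.List.pyGet?, PySem.List.pyIdx?]
  rw [h2, Option.getD_some]
  exact natAbs_tdiv_lt hs2 hdb hb0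

-- ===== PORT B =====
def gcdAux (x y : Nat) : Nat :=
  if y = 0 then x else gcdAux y (x % y)
termination_by y
decreasing_by exact Nat.mod_lt _ (Nat.pos_of_ne_zero (by assumption))

def minfacAux (g i : Nat) : Nat :=
  if h : i * i ≤ g then (if g % i = 0 then i else minfacAux g (i+1)) else g
termination_by g + 1 - i
decreasing_by
  rcases Nat.eq_zero_or_pos i with h0 | h0
  · omega
  · have hii : i ≤ i * i := Nat.le_mul_of_pos_left _ h0
    omega

def uprostit_alt (oper1 : List Int) : List Int :=
  match PySem.List.pyGet? oper1 0 with
  | none => oper1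
  | some a =>
  match PySem.List.pyGet? oper1 1 with
  | none => oper1
  | some b =>
    let g := gcdAux a.natAbs b.natAbs
    let bound := b.natAbs / 2
    if 2 ≤ g ∧ g ≤ bound then
      [PySem.Int.floordiv a (g:Int), PySem.Int.floordiv b (g:Int)]
    else if 2 ≤ g then
      let d := g / minfacAux g 2
      if 2 ≤ d ∧ d ≤ bound then
        [PySem.Int.floordiv a (d:Int), PySem.Int.floordiv b (d:Int)]
      else oper1
    else oper1

-- ===== PRECONDITION & SPEC =====
-- Pre_ excludes only lists of length < 2, on which A raises IndexError (oper1[1]).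
def Pre_uprostit (oper1 : List Int) : Prop := 2 ≤ oper1.length
instance (oper1 : List Int) : Decidable (Pre_uprostit oper1) := by unfold Pre_uprostit; infer_instance
def pvWitness_uprostit : List Int := [6, 4]

def Spec_uprostit (oper1 : List Int) (out : List Int) : Prop := out = uprostit_alt oper1
instance (oper1 : List Int) (out : List Int) : Decidable (Spec_uprostit oper1 out) := by unfold Spec_uprostit; infer_instance

-- ===== CLAIM (what is proved, stated in full; the proofs are below) =====
def Claim_equal_uprostit : Prop := ∀ (oper1 : List Int), Dom_uprostit oper1 → Pre_uprostit oper1 → Spec_uprostit oper1 (uprostit oper1)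

-- ===== LEMMAS AND PROOFS =====

theorem gcdAux_eq (x y : Nat) : gcdAux x y = Nat.gcd x y := by
  induction y using Nat.strong_induction_on generalizing x with
  | _ y ih =>
    rw [gcdAux]
    split
    · rename_i h; subst h; simp
    · rename_i h
      rw [ih (x % y) (Nat.mod_lt _ (Nat.pos_of_ne_zero h)) y]
      rw [Nat.gcd_comm y (x % y), ← Nat.gcd_rec, Nat.gcd_comm]

theorem minfacAux_eq_aux (g : Nat) (k : Nat) : ∀ i, g + 1 - i ≤ k → 2 ≤ g → 2 ≤ i →
    (∀ j, 2 ≤ j → j < i → ¬ j ∣ g) → minfacAux g i = Nat.minFac g := by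
  induction k with
  | zero =>
    intro i hk hg hi hinv
    have hii : ¬ i * i ≤ g := by
      intro h
      have : i ≤ i * i := Nat.le_mul_of_pos_left _ (by omega)
      omega
    rw [minfacAux, dif_neg hii]
    -- i > g, so the invariant covers all of [2, g]; only g itself can be the least factor
    have hp2 : 2 ≤ Nat.minFac g := (Nat.minFac_prime (by omega : g ≠ 1)).two_le
    have hpd : Nat.minFac g ∣ g := Nat.minFac_dvd g
    have hle : Nat.minFac g ≤ g := Nat.le_of_dvd (by omega) hpd
    by_contra hne
    exact hinv _ hp2 (by omega) hpd
  | succ k ih =>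
    intro i hk hg hi hinv
    rw [minfacAux]
    by_cases hii : i * i ≤ g
    · rw [dif_pos hii]
      by_cases hmod : g % i = 0
      · rw [if_pos hmod]
        have hidvd : i ∣ g := Nat.dvd_iff_mod_eq_zero.mpr hmod
        have hle : Nat.minFac g ≤ i := Nat.minFac_le_of_dvd hi hidvd
        have hp2 : 2 ≤ Nat.minFac g := (Nat.minFac_prime (by omega : g ≠ 1)).two_le
        have hnl : ¬ Nat.minFac g < i := fun hlt => hinv _ hp2 hlt (Nat.minFac_dvd g)
        omega
      · rw [if_neg hmod]
        apply ih (i+1) (by omega) hg (by omega)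
        intro j hj2 hji hjd
        rcases Nat.lt_or_ge j i with hlt | hge
        · exact hinv j hj2 hlt hjd
        · have : j = i := by omega
          subst this
          exact hmod (Nat.dvd_iff_mod_eq_zero.mp hjd)
    · rw [dif_neg hii]
      have hp2 : 2 ≤ Nat.minFac g := (Nat.minFac_prime (by omega : g ≠ 1)).two_le
      have hpd : Nat.minFac g ∣ g := Nat.minFac_dvd g
      have hpi : i ≤ Nat.minFac g := by
        by_contra hlt
        exact hinv _ hp2 (by omega) hpd
      obtain ⟨c, hc⟩ := hpd
      rcases Nat.lt_or_ge c 2 with hc2 | hc2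
      · rcases (by omega : c = 0 ∨ c = 1) with rfl | rfl <;> omega
      · exfalso
        have hcd : c ∣ g := ⟨Nat.minFac g, by rw [Nat.mul_comm c (Nat.minFac g)]; exact hc⟩
        have hci : i ≤ c := by
          by_contra hlt
          exact hinv _ hc2 (by omega) hcd
        have : i * i ≤ Nat.minFac g * c := Nat.mul_le_mul hpi hci
        omega

theorem minfacAux_eq (g : Nat) (hg : 2 ≤ g) : minfacAux g 2 = Nat.minFac g :=
  minfacAux_eq_aux g (g + 1) 2 (by omega) hg (le_refl _) (by omega)

theorem findS_eq_none (a b : Int) (n : Nat)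
    (h : ∀ s : Nat, 2 ≤ s → s ≤ n → ¬((s:Int) ∣ a ∧ (s:Int) ∣ b)) :
    findS a b n = none := by
  induction n with
  | zero => rw [findS]
  | succ m ih =>
    cases m with
    | zero => rw [findS]
    | succ k =>
      rw [findS, if_neg, ih]
      · intro s hs2 hsn
        exact h s hs2 (by omega)
      · intro hc
        obtain ⟨h1, h2⟩ := hc
        rw [PySem.Int.mod_eq_zero_iff_dvd] at h1 h2
        exact h (k+2) (by omega) (le_refl _) ⟨by exact_mod_cast h1, by exact_mod_cast h2⟩

theorem findS_eq_some (a b : Int) (n s : Nat) (h2 : 2 ≤ s) (hn : s ≤ n)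
    (hda : (s:Int) ∣ a) (hdb : (s:Int) ∣ b)
    (hmax : ∀ t : Nat, s < t → t ≤ n → ¬((t:Int) ∣ a ∧ (t:Int) ∣ b)) :
    findS a b n = some s := by
  induction n with
  | zero => omega
  | succ m ih =>
    cases m with
    | zero => omega
    | succ k =>
      rw [findS]
      by_cases hsk : s = k + 2
      · subst hsk
        rw [if_pos]
        constructor <;> rw [PySem.Int.mod_eq_zero_iff_dvd]
        · exact_mod_cast hda
        · exact_mod_cast hdb
      · rw [if_neg]
        · exact ih (by omega) (fun t ht1 ht2 => hmax t ht1 (by omega))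
        · intro hc
          obtain ⟨hc1, hc2⟩ := hc
          rw [PySem.Int.mod_eq_zero_iff_dvd] at hc1 hc2
          exact hmax (k+2) (by omega) (le_refl _)
            ⟨by exact_mod_cast hc1, by exact_mod_cast hc2⟩

-- a divisor s ≥ 2 of |b| fits under A's bound |b//2| iff it fits under ⌊|b|/2⌋
theorem divisor_le_bound {b : Int} {s : Nat} (h2 : 2 ≤ s) (hd : s ∣ b.natAbs) :
    s ≤ (PySem.Int.floordiv b 2).natAbs ↔ s ≤ b.natAbs / 2 := by
  rw [PySem.Int.floordiv_eq_ediv_of_pos (by norm_num)]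
  obtain ⟨k, hk⟩ := hd
  constructor
  · intro h
    by_contra hnot
    have h1 : 2 * s = b.natAbs + 1 := by omega
    rcases Nat.lt_or_ge k 2 with hk2 | hk2
    · rcases (by omega : k = 0 ∨ k = 1) with rfl | rfl <;> omega
    · have hmul : s * 2 ≤ s * k := Nat.mul_le_mul_left s hk2
      omega
  · intro h
    omega

theorem int_dvd_iff_natAbs (s : Nat) (x : Int) : (s:Int) ∣ x ↔ s ∣ x.natAbs := by
  rw [← Int.natAbs_dvd_natAbs, Int.natAbs_natCast]

theorem natAbs_tdiv_exact {x : Int} {s : Nat} (hs : 0 < s) (h : (s:Int) ∣ x) :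
    (x.tdiv (s:Int)).natAbs = x.natAbs / s := by
  obtain ⟨k, rfl⟩ := h
  rw [Int.mul_tdiv_cancel_left _ (by exact_mod_cast (by omega : s ≠ 0))]
  rw [Int.natAbs_mul, Int.natAbs_natCast, Nat.mul_div_cancel_left _ hs]

theorem tdiv_eq_floordiv {x : Int} {s : Nat} (hs : 0 < s) (h : (s:Int) ∣ x) :
    x.tdiv (s:Int) = PySem.Int.floordiv x (s:Int) := by
  rw [PySem.Int.floordiv_eq_ediv_of_pos (by exact_mod_cast hs)]
  obtain ⟨k, rfl⟩ := h
  have hne : (s:Int) ≠ 0 := by exact_mod_cast (by omega : s ≠ 0)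
  rw [Int.mul_tdiv_cancel_left _ hne, Int.mul_ediv_cancel_left _ hne]

-- one unfolding of A's recursion on a list with at least two elements
theorem uprostit_cons (a b : Int) (t : List Int) :
    uprostit (a :: b :: t) =
      (match findS a b (PySem.Int.floordiv b 2).natAbs with
      | some s => uprostit [Int.tdiv a (s:Int), Int.tdiv b (s:Int)]
      | none => a :: b :: t) := by
  have hg0 : PySem.List.pyGet? (a :: b :: t) 0 = some a :=
    PySem.List.pyGet?_zero_cons a (b :: t)
  have hg1 : PySem.List.pyGet? (a :: b :: t) 1 = some b := by
    rw [show (1:Int) = ((1:Nat):Int) from rfl, PySem.List.pyGet?_natCast]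
    rfl
  rw [uprostit.eq_def]
  split
  · rename_i a' b' h0 h1
    rw [hg0] at h0; rw [hg1] at h1
    cases h0; cases h1
    split
    · rename_i s heq
      rw [heq]
    · rename_i heq
      rw [heq]
  · rename_i hno
    exact (hno a b hg0 hg1).elim

theorem uprostit_cons_some {a b : Int} {t : List Int} {s : Nat}
    (h : findS a b (PySem.Int.floordiv b 2).natAbs = some s) :
    uprostit (a :: b :: t) = uprostit [Int.tdiv a (s:Int), Int.tdiv b (s:Int)] := by
  rw [uprostit_cons, h]

theorem uprostit_cons_none {a b : Int} {t : List Int}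
    (h : findS a b (PySem.Int.floordiv b 2).natAbs = none) :
    uprostit (a :: b :: t) = a :: b :: t := by
  rw [uprostit_cons, h]

-- a pair on which A's scan finds nothing is returned unchanged
theorem uprostit_pair_eq_self (x y : Int)
    (h : ∀ s : Nat, 2 ≤ s → s ≤ (PySem.Int.floordiv y 2).natAbs →
      ¬((s:Int) ∣ x ∧ (s:Int) ∣ y)) :
    uprostit [x, y] = [x, y] :=
  uprostit_cons_none (t := []) (findS_eq_none x y _ h)

-- ===== VERDICT (by name: the statement is the Claim_ definition above) =====
theorem uprostit_spec : Claim_equal_uprostit := by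
  intro oper1 _ hpre
  unfold Spec_uprostit
  unfold Pre_uprostit at hpre
  match oper1, hpre with
  | a :: b :: t, _ =>
  have hg0 : PySem.List.pyGet? (a :: b :: t) 0 = some a :=
    PySem.List.pyGet?_zero_cons a (b :: t)
  have hg1 : PySem.List.pyGet? (a :: b :: t) 1 = some b := by
    rw [show (1:Int) = ((1:Nat):Int) from rfl, PySem.List.pyGet?_natCast]
    rfl
  set na := a.natAbs with hna
  set nb := b.natAbs with hnb
  set g := Nat.gcd na nb with hgdef
  set bound := nb / 2 with hbound
  set n := (PySem.Int.floordiv b 2).natAbs with hn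
  -- B's value, with the match and gcd computed
  have hB : uprostit_alt (a :: b :: t) =
      (if 2 ≤ g ∧ g ≤ bound then
        [PySem.Int.floordiv a (g:Int), PySem.Int.floordiv b (g:Int)]
      else if 2 ≤ g then
        if 2 ≤ g / minfacAux g 2 ∧ g / minfacAux g 2 ≤ bound then
          [PySem.Int.floordiv a ((g / minfacAux g 2 : Nat):Int),
           PySem.Int.floordiv b ((g / minfacAux g 2 : Nat):Int)]
        else a :: b :: t
      else a :: b :: t) := by
    rw [uprostit_alt.eq_def]
    rw [hg0, hg1]
    simp only [gcdAux_eq, ← hna, ← hnb, ← hgdef, ← hbound]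
  -- common-divisor transfer
  have hcd : ∀ s : Nat, ((s:Int) ∣ a ∧ (s:Int) ∣ b) ↔ s ∣ g := by
    intro s
    rw [int_dvd_iff_natAbs, int_dvd_iff_natAbs, ← hna, ← hnb]
    exact ⟨fun ⟨u, v⟩ => Nat.dvd_gcd u v,
      fun hsg => ⟨hsg.trans (Nat.gcd_dvd_left _ _), hsg.trans (Nat.gcd_dvd_right _ _)⟩⟩
  have hgna : g ∣ na := Nat.gcd_dvd_left _ _
  have hgnb : g ∣ nb := Nat.gcd_dvd_right _ _
  have hnbeq : b.natAbs = nb := hnb.symm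
  by_cases hbig : 2 ≤ g ∧ g ≤ bound
  · obtain ⟨hg2, hgle⟩ := hbig
    have hgn : g ≤ n := (divisor_le_bound hg2 (hnbeq ▸ hgnb)).mpr (by omega)
    have hgab : (g:Int) ∣ a ∧ (g:Int) ∣ b := (hcd g).mpr dvd_rfl
    have hfs : findS a b n = some g := by
      apply findS_eq_some a b n g hg2 hgn hgab.1 hgab.2
      intro u hgu hun hu
      have hud : u ∣ g := (hcd u).mp hu
      have := Nat.le_of_dvd (by omega) hud
      omega
    -- the reduced pair is coprime, so the recursive call returns it unchanged
    have hcop : Nat.gcd (na / g) (nb / g) = 1 :=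
      Nat.coprime_div_gcd_div_gcd (by omega : 0 < Nat.gcd na nb)
    have hsda : (Int.tdiv a (g:Int)).natAbs = na / g := natAbs_tdiv_exact (by omega) hgab.1
    have hsdb : (Int.tdiv b (g:Int)).natAbs = nb / g := natAbs_tdiv_exact (by omega) hgab.2
    have hid : uprostit [Int.tdiv a (g:Int), Int.tdiv b (g:Int)] =
        [Int.tdiv a (g:Int), Int.tdiv b (g:Int)] := by
      apply uprostit_pair_eq_self
      intro s hs2 _ hsc
      have h1 : s ∣ (Int.tdiv a (g:Int)).natAbs := (int_dvd_iff_natAbs s _).mp hsc.1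
      have h2 : s ∣ (Int.tdiv b (g:Int)).natAbs := (int_dvd_iff_natAbs s _).mp hsc.2
      rw [hsda] at h1; rw [hsdb] at h2
      have hs1 : s ∣ 1 := by rw [← hcop]; exact Nat.dvd_gcd h1 h2
      have := Nat.le_of_dvd one_pos hs1
      omega
    rw [uprostit_cons_some (hn ▸ hfs), hid, hB, if_pos ⟨hg2, hgle⟩,
      tdiv_eq_floordiv (by omega) hgab.1, tdiv_eq_floordiv (by omega) hgab.2]
  · by_cases hg2 : 2 ≤ g
    · have hgleF : ¬ g ≤ bound := fun h => hbig ⟨hg2, h⟩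
      -- g ∣ nb and nb/2 < g force nb = 0 or nb = g
      have hnb_cases : nb = 0 ∨ nb = g := by
        obtain ⟨k, hk⟩ := hgnb
        rcases Nat.lt_or_ge k 2 with hk2 | hk2
        · rcases (by omega : k = 0 ∨ k = 1) with rfl | rfl <;> omega
        · exfalso
          have : g * 2 ≤ g * k := Nat.mul_le_mul_left g hk2
          omega
      rcases hnb_cases with hz | he
      · -- b = 0 : the bound is 0, nothing happens on either side
        have hb0 : b = 0 := by omega
        have hn0 : n = 0 := by
          rw [hn, hb0, PySem.Int.floordiv_eq_ediv_of_pos (by norm_num)]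
          rfl
        have hfs : findS a b n = none := by rw [hn0]; rw [findS]
        rw [uprostit_cons_none (hn ▸ hfs), hB, if_neg hbig, if_pos hg2, if_neg]
        intro hc
        omega
      · -- |b| = g : the step divisor is g's largest proper divisor g / p
        have hb0 : b ≠ 0 := by intro hb; rw [hb] at hnb; simp at hnb; omega
        set p := Nat.minFac g with hpdef
        have hpp : Nat.Prime p := Nat.minFac_prime (by omega : g ≠ 1)
        have hpd : p ∣ g := Nat.minFac_dvd g
        have hp2 : 2 ≤ p := hpp.two_le
        set d := g / p with hddef
        have hdg : d ∣ g := Nat.div_dvd_of_dvd hpd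
        have hgdp : g / d = p := Nat.div_div_self hpd (by omega)
        have hmf : minfacAux g 2 = p := minfacAux_eq g hg2
        have hdnb : d ∣ b.natAbs := by rw [hnbeq, he]; exact hdg
        by_cases hd2 : 2 ≤ d
        · have hdle : d ≤ bound := by
            have : g / p ≤ g / 2 := Nat.div_le_div_left hp2 (by omega)
            omega
          have hdab : (d:Int) ∣ a ∧ (d:Int) ∣ b := (hcd d).mpr hdg
          have hdn : d ≤ n := (divisor_le_bound hd2 hdnb).mpr (by omega)
          have hfs : findS a b n = some d := by
            apply findS_eq_some a b n d hd2 hdn hdab.1 hdab.2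
            intro u hdu hun hu
            have hug : u ∣ g := (hcd u).mp hu
            have hu2 : 2 ≤ u := by
              have := Nat.le_of_dvd (by omega : 0 < g) hug
              omega
            have hunb : u ∣ b.natAbs := by rw [hnbeq, he]; exact hug
            have hub : u ≤ b.natAbs / 2 := (divisor_le_bound hu2 hunb).mp hun
            have hult : u < g := by omega
            -- u is a proper divisor, so its cofactor is ≥ p and u ≤ g/p = d
            obtain ⟨c, hc⟩ := hug
            have hc2 : 2 ≤ c := by
              rcases Nat.lt_or_ge c 2 with h | h
              · rcases (by omega : c = 0 ∨ c = 1) with rfl | rfl <;> omega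
              · exact h
            have hcg : c ∣ g := ⟨u, by rw [hc, Nat.mul_comm]⟩
            have hpc : p ≤ c := Nat.minFac_le_of_dvd hc2 hcg
            have huc : u = g / c := by
              rw [hc, Nat.mul_div_cancel _ (by omega : 0 < c)]
            have hcp : g / c ≤ g / p := Nat.div_le_div_left hpc (by omega)
            omega
          have hsdb : (Int.tdiv b (d:Int)).natAbs = nb / d :=
            natAbs_tdiv_exact (by omega) hdab.2
          have hid : uprostit [Int.tdiv a (d:Int), Int.tdiv b (d:Int)] =
              [Int.tdiv a (d:Int), Int.tdiv b (d:Int)] := by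
            apply uprostit_pair_eq_self
            intro s hs2 hsn hsc
            have h2 : s ∣ (Int.tdiv b (d:Int)).natAbs := (int_dvd_iff_natAbs s _).mp hsc.2
            have hbp : (Int.tdiv b (d:Int)).natAbs = p := by rw [hsdb, he, hgdp]
            rw [hbp] at h2
            have hsp : s = p :=
              ((Nat.Prime.eq_one_or_self_of_dvd hpp s h2).resolve_left (by omega))
            have := (divisor_le_bound hs2 (hbp ▸ h2)).mp hsn
            omega
          rw [uprostit_cons_some (hn ▸ hfs), hid, hB, if_neg hbig, if_pos hg2, hmf,
            ← hddef, if_pos ⟨hd2, hdle⟩,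
            tdiv_eq_floordiv (by omega) hdab.1, tdiv_eq_floordiv (by omega) hdab.2]
        · -- g / p < 2 : g is prime, no divisor fits under the bound; both sides unchanged
          have hfs : findS a b n = none := by
            apply findS_eq_none
            intro s hs2 hsn hsc
            have hsg : s ∣ g := (hcd s).mp hsc
            have hgp : g = p := by
              obtain ⟨c, hc⟩ := hpd
              have hcval : c = g / p := by
                rw [hc, Nat.mul_div_cancel_left _ (by omega : 0 < p)]
              rcases Nat.lt_or_ge c 2 with h | h
              · rcases (by omega : c = 0 ∨ c = 1) with rfl | rfl <;> omega
              · omega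
            have hsp : s = g := by
              rw [hgp] at hsg ⊢
              exact (Nat.Prime.eq_one_or_self_of_dvd hpp s hsg).resolve_left (by omega)
            have hsnb : s ∣ b.natAbs := by rw [hnbeq, he, hsp]
            have := (divisor_le_bound hs2 hsnb).mp hsn
            omega
          rw [uprostit_cons_none (hn ▸ hfs), hB, if_neg hbig, if_pos hg2, hmf, ← hddef,
            if_neg (by intro hc; omega)]
    · -- g ≤ 1 : no common divisor s ≥ 2 exists at all
      have hfs : findS a b n = none := by
        apply findS_eq_none
        intro s hs2 hsn hsc
        have hsg : s ∣ g := (hcd s).mp hsc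
        rcases Nat.lt_or_ge g 1 with h | h
        · -- g = 0 : then |b| = 0, so the bound is 0 and s ≤ 0 is impossible
          have hnb0 : nb = 0 := Nat.eq_zero_of_gcd_eq_zero_right (m := na) (by omega)
          have hb0 : b = 0 := by omega
          rw [hn, hb0, PySem.Int.floordiv_eq_ediv_of_pos (by norm_num)] at hsn
          simp at hsn
          omega
        · have hg1 : g = 1 := by omega
          rw [hg1] at hsg
          have := Nat.le_of_dvd Nat.one_pos hsg
          omega
      rw [uprostit_cons_none (hn ▸ hfs), hB, if_neg hbig, if_neg hg2]
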